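-- pv_equiv track=rewrite | github.com/PreciousWarrior/PolynomialSequenceSolver | main.py | get_polynomial_degree
-- ===== SOURCE A (Python) =====
-- def get_polynomial_degree(sequence, n=0):
--     if len(sequence) <= 1:
--         return None
--     if sequence.count(sequence[0]) == len(sequence):
--         return n
--     differences = []
--     for index in range(1, len(sequence)):
--         difference = sequence[index] - sequence[index-1]
--         differences.append(difference)
--     return get_polynomial_degree(differences, n+1)
-- ===== SOURCE B (Python) =====
-- def get_polynomial_degree(sequence, n=0):
--     if len(sequence) <= 1:
--         return None
--     while len(sequence) > 1:
--         if sequence.count(sequence[0]) == len(sequence):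
--             return n
--         sequence = [sequence[i] - sequence[i - 1] for i in range(1, len(sequence))]
--         n += 1
--     return None
-- ===== Notes on version B (the rewrite author's own statement) =====
-- stated objective: simpler
-- what changed: Replaces the tail recursion (guard re-checked at every level, differences built by an explicit append loop) with a single guard followed by an iterative while-loop that reassigns the sequence to a difference-list comprehension.
import Mathlib
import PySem

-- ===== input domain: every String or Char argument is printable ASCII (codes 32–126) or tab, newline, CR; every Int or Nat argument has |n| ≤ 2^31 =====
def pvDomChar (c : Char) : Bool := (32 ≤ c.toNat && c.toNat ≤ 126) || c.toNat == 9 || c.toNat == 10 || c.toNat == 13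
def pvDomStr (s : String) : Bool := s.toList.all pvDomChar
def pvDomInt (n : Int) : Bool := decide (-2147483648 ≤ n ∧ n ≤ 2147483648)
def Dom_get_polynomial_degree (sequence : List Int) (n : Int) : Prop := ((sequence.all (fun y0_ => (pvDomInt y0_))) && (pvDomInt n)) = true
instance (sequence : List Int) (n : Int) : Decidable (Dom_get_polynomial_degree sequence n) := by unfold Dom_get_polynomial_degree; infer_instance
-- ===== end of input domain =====

-- B rewrites A's tail recursion as a single length guard followed by an iterative loop
-- that reassigns the sequence to a difference-list comprehension (objective: simpler).

-- ===== PORT A =====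
-- literal port of A: guard, all-equal count check, differences built by an append loop, recurse
def get_polynomial_degree (sequence : List Int) (n : Int) : Option Int :=
  if sequence.length ≤ 1 then none
  else if sequence.count (PySem.List.pyGetD sequence 0 0) = sequence.length then some n
  else
    let differences := (PySem.List.pyRange 1 (sequence.length : Int) 1).foldl
      (fun diffs index =>
        diffs ++ [PySem.List.pyGetD sequence index 0 - PySem.List.pyGetD sequence (index - 1) 0]) []
    get_polynomial_degree differences (n + 1)
termination_by sequence.length
decreasing_by
  rw [PySem.List.foldl_append_singleton_eq_map]
  simp [PySem.List.length_pyRange_one]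
  omega

-- ===== PORT B =====
-- the while-loop of Source B: condition len > 1, body checks all-equal then reassigns
def gpdLoop (sequence : List Int) (n : Int) : Option Int :=
  if 1 < sequence.length then
    if sequence.count (PySem.List.pyGetD sequence 0 0) = sequence.length then some n
    else gpdLoop
      ((PySem.List.pyRange 1 (sequence.length : Int) 1).map
        (fun i => PySem.List.pyGetD sequence i 0 - PySem.List.pyGetD sequence (i - 1) 0))
      (n + 1)
  else none
termination_by sequence.length
decreasing_by
  simp [PySem.List.length_pyRange_one]
  omega

def get_polynomial_degree_alt (sequence : List Int) (n : Int) : Option Int :=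
  if sequence.length ≤ 1 then none
  else gpdLoop sequence n

-- ===== PRECONDITION & SPEC =====
def Spec_get_polynomial_degree (sequence : List Int) (n : Int) (out : Option Int) : Prop := out = get_polynomial_degree_alt sequence n
instance (sequence : List Int) (n : Int) (out : Option Int) : Decidable (Spec_get_polynomial_degree sequence n out) := by unfold Spec_get_polynomial_degree; infer_instance

-- ===== CLAIM (what is proved, stated in full; the proofs are below) =====
def Claim_equal_get_polynomial_degree : Prop := ∀ (sequence : List Int) (n : Int), Dom_get_polynomial_degree sequence n → Spec_get_polynomial_degree sequence n (get_polynomial_degree sequence n)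

-- ===== LEMMAS AND PROOFS =====

-- A's append-loop builds exactly B's comprehension (the difference list)
theorem gpd_diffs_eq (sequence : List Int) :
    (PySem.List.pyRange 1 (sequence.length : Int) 1).foldl
      (fun diffs index =>
        diffs ++ [PySem.List.pyGetD sequence index 0 - PySem.List.pyGetD sequence (index - 1) 0]) []
    = (PySem.List.pyRange 1 (sequence.length : Int) 1).map
        (fun i => PySem.List.pyGetD sequence i 0 - PySem.List.pyGetD sequence (i - 1) 0) := by
  simpa using PySem.List.foldl_append_singleton_eq_map
    (fun i => PySem.List.pyGetD sequence i 0 - PySem.List.pyGetD sequence (i - 1) 0)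
    (PySem.List.pyRange 1 (sequence.length : Int) 1) []

theorem gpd_eq_loop (sequence : List Int) (n : Int) (h : 1 < sequence.length) :
    get_polynomial_degree sequence n = gpdLoop sequence n := by
  induction hlen : sequence.length using Nat.strong_induction_on generalizing sequence n with
  | _ L ih =>
    subst hlen
    rw [get_polynomial_degree.eq_def, gpdLoop.eq_def]
    simp only [if_pos h, if_neg (by omega : ¬ sequence.length ≤ 1), gpd_diffs_eq]
    split
    · rfl
    · set diffs := (PySem.List.pyRange 1 (sequence.length : Int) 1).map
        (fun i => PySem.List.pyGetD sequence i 0 - PySem.List.pyGetD sequence (i - 1) 0) with hd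
      have hlen : diffs.length = sequence.length - 1 := by
        simp [hd, PySem.List.length_pyRange_one]
      by_cases h2 : 1 < diffs.length
      · exact ih diffs.length (by omega) diffs (n + 1) h2 rfl
      · rw [get_polynomial_degree.eq_def, gpdLoop.eq_def]
        simp [if_neg h2, if_pos (by omega : diffs.length ≤ 1)]

-- ===== VERDICT (by name: the statement is the Claim_ definition above) =====
theorem get_polynomial_degree_spec : Claim_equal_get_polynomial_degree := by
  intro sequence n _
  unfold Spec_get_polynomial_degree get_polynomial_degree_alt
  by_cases h : sequence.length ≤ 1
  · rw [if_pos h, get_polynomial_degree.eq_def, if_pos h]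
  · rw [if_neg h]
    exact gpd_eq_loop sequence n (by omega)
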